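-- pv_equiv track=rewrite | github.com/thebugcreator/ul-pmb | analysis/tokeniser_analysis.py | generate_iob_from_tokens
-- ===== SOURCE A (Python) =====
-- def generate_iob_from_tokens(tokens):
--     """
--     To get the IOB tags of a list of tokens
--     :param tokens: A list of tokens
--     :return: IOB tags
--     """
--     iobs = []
--     for i, token in enumerate(tokens):
--         if token:
--             iob = ["I"] * len(token)
--             iob[0] = "B"
--         else:
--             iob = []
--         iobs.append("".join(iob))
--     return "".join(iobs)
-- ===== SOURCE B (Python) =====
-- def generate_iob_from_tokens(tokens):
--     total = sum(len(t) for t in tokens if t)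
--     chars = ["I"] * total
--     pos = 0
--     for t in tokens:
--         if t:
--             chars[pos] = "B"
--             pos += len(t)
--     return "".join(chars)
-- ===== Notes on version B (the rewrite author's own statement) =====
-- stated objective: alternative
-- what changed: Replaces A's per-token substring building and double join with a preallocated buffer of 'I' characters into which 'B' is stamped at each token's start offset via a running position pointer.
import Mathlib
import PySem

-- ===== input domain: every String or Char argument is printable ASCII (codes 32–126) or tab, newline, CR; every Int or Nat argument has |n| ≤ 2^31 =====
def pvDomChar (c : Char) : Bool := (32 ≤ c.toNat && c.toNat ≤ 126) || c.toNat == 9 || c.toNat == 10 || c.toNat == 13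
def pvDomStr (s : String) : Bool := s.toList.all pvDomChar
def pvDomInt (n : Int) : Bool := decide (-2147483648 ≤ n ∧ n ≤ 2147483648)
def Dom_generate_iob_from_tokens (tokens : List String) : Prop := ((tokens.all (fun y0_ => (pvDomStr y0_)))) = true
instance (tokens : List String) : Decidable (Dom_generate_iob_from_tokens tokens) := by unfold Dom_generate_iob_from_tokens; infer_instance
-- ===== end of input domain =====

-- ===== PORT A =====
-- B replaces A's per-token list building and join with a preallocated 'I' buffer stamped with 'B' at token starts (alternative decomposition, same cost).
-- A: builds per-token IOB strings and joins them; loops transliterated as foldl.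
def generate_iob_from_tokens (tokens : List String) : String :=
  let iobs : List String := tokens.foldl (fun iobs token =>
    let iob : List Char :=
      if token.toList ≠ [] then (List.replicate token.toList.length 'I').set 0 'B'
      else []
    iobs ++ [String.ofList iob]) []
  String.ofList (iobs.foldl (fun a s => a ++ s.toList) [])

-- ===== PORT B =====
-- B: preallocate total 'I's, stamp 'B' at each truthy token's start offset.
def generate_iob_from_tokens_alt (tokens : List String) : String :=
  let total : Nat := tokens.foldl (fun n t => if t.toList ≠ [] then n + t.toList.length else n) 0
  let init : List Char := List.replicate total 'I'
  let res := tokens.foldl (fun (st : List Char × Nat) t =>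
      if t.toList ≠ [] then (st.1.set st.2 'B', st.2 + t.toList.length) else st) (init, 0)
  String.ofList res.1

-- ===== PRECONDITION & SPEC =====
def Spec_generate_iob_from_tokens (tokens : List String) (out : String) : Prop := out = generate_iob_from_tokens_alt tokens
instance (tokens : List String) (out : String) : Decidable (Spec_generate_iob_from_tokens tokens out) := by unfold Spec_generate_iob_from_tokens; infer_instance

-- ===== CLAIM (what is proved, stated in full; the proofs are below) =====
def Claim_equal_generate_iob_from_tokens : Prop := ∀ (tokens : List String), Dom_generate_iob_from_tokens tokens → Spec_generate_iob_from_tokens tokens (generate_iob_from_tokens tokens)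

-- ===== LEMMAS AND PROOFS =====
-- per-token IOB chunk
def iobOf (t : String) : List Char :=
  if t.toList ≠ [] then (List.replicate t.toList.length 'I').set 0 'B' else []

-- total length of the IOB chunks
def sumT (tokens : List String) : Nat := (tokens.map (fun t => (iobOf t).length)).sum

lemma iobOf_nil (t : String) (h : t.toList = []) : iobOf t = [] := by
  simp [iobOf, h]

lemma iobOf_cons (t : String) (h : t.toList ≠ []) :
    iobOf t = 'B' :: List.replicate (t.toList.length - 1) 'I' := by
  unfold iobOf
  rw [if_pos h]
  cases hc : t.toList with
  | nil => exact absurd hc h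
  | cons c cs =>
    show (List.replicate (cs.length + 1) 'I').set 0 'B' = 'B' :: List.replicate (cs.length + 1 - 1) 'I'
    rw [List.replicate_succ, List.set_cons_zero, Nat.add_sub_cancel]

lemma foldA_join (tokens : List String) (acc : List String) :
    (tokens.foldl (fun iobs token =>
      let iob : List Char :=
        if token.toList ≠ [] then (List.replicate token.toList.length 'I').set 0 'B'
        else []
      iobs ++ [String.ofList iob]) acc).foldl (fun a s => a ++ s.toList) []
    = (acc.foldl (fun a s => a ++ s.toList) []) ++ tokens.flatMap iobOf := by
  induction tokens generalizing acc with
  | nil => simp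
  | cons t ts ih =>
    rw [List.foldl_cons, List.flatMap_cons, ih, List.foldl_append]
    rw [List.foldl_cons, List.foldl_nil, String.toList_ofList]
    show _ ++ iobOf t ++ _ = _
    rw [List.append_assoc]

lemma total_eq (tokens : List String) (n : Nat) :
    tokens.foldl (fun n t => if t.toList ≠ [] then n + t.toList.length else n) n
    = n + sumT tokens := by
  induction tokens generalizing n with
  | nil => simp [sumT]
  | cons t ts ih =>
    rw [List.foldl_cons, ih]
    by_cases h : t.toList = []
    · rw [if_neg (by simp [h])]
      have hs : sumT (t :: ts) = sumT ts := by simp [sumT, iobOf_nil t h]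
      rw [hs]
    · rw [if_pos h]
      have h1 : 1 ≤ t.toList.length := List.length_pos_iff.mpr h
      have hlio : (iobOf t).length = t.toList.length := by
        rw [iobOf_cons t h, List.length_cons, List.length_replicate]; omega
      have hs : sumT (t :: ts) = t.toList.length + sumT ts := by simp [sumT, hlio]
      rw [hs]; omega

lemma stamp_inv (tokens : List String) (pref : List Char) :
    tokens.foldl (fun (st : List Char × Nat) t =>
      if t.toList ≠ [] then (st.1.set st.2 'B', st.2 + t.toList.length) else st)
      (pref ++ List.replicate (sumT tokens) 'I', pref.length)
    = (pref ++ tokens.flatMap iobOf, pref.length + sumT tokens) := by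
  induction tokens generalizing pref with
  | nil => simp [sumT]
  | cons t ts ih =>
    by_cases h : t.toList = []
    · have hs : sumT (t :: ts) = sumT ts := by simp [sumT, iobOf_nil t h]
      rw [List.foldl_cons, if_neg (by simp [h]), hs, ih, List.flatMap_cons, iobOf_nil t h,
        List.nil_append]
    · have hlen : 1 ≤ t.toList.length := List.length_pos_iff.mpr h
      have hlio : (iobOf t).length = t.toList.length := by
        rw [iobOf_cons t h, List.length_cons, List.length_replicate]; omega
      have hs : sumT (t :: ts) = t.toList.length + sumT ts := by
        simp [sumT, hlio]
      have hrep : List.replicate (sumT (t :: ts)) 'I'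
          = 'I' :: (List.replicate (t.toList.length - 1) 'I' ++ List.replicate (sumT ts) 'I') := by
        rw [hs, ← List.replicate_add]
        have he : t.toList.length + sumT ts = ((t.toList.length - 1) + sumT ts) + 1 := by omega
        rw [he, List.replicate_succ]
      have hset : (pref ++ List.replicate (sumT (t :: ts)) 'I').set pref.length 'B'
          = (pref ++ iobOf t) ++ List.replicate (sumT ts) 'I' := by
        rw [hrep, iobOf_cons t h,
          List.set_append_right _ _ (le_refl pref.length), Nat.sub_self, List.set_cons_zero,
          List.append_assoc, List.cons_append]
      rw [List.foldl_cons, if_pos h]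
      show ts.foldl _ ((pref ++ List.replicate (sumT (t :: ts)) 'I').set pref.length 'B',
        pref.length + t.toList.length) = _
      rw [hset]
      have hl : pref.length + t.toList.length = (pref ++ iobOf t).length := by
        rw [List.length_append, hlio]
      rw [hl, ih (pref ++ iobOf t), List.flatMap_cons, List.append_assoc, List.length_append,
        hlio, hs]
      rw [Nat.add_assoc]

-- ===== VERDICT (by name: the statement is the Claim_ definition above) =====
theorem generate_iob_from_tokens_spec : Claim_equal_generate_iob_from_tokens := by
  intro tokens _
  unfold Spec_generate_iob_from_tokens generate_iob_from_tokens generate_iob_from_tokens_alt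
  have hA := foldA_join tokens []
  have htot := total_eq tokens 0
  have hB := stamp_inv tokens []
  rw [List.foldl_nil] at hA
  rw [List.nil_append] at hA
  show String.ofList _ = String.ofList _
  rw [hA, htot, Nat.zero_add]
  show _ = String.ofList (tokens.foldl _ (List.replicate (sumT tokens) 'I', 0)).1
  have : (List.replicate (sumT tokens) 'I', 0)
      = (([] : List Char) ++ List.replicate (sumT tokens) 'I', ([] : List Char).length) := by
    simp
  rw [this, hB]
  rfl
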